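-- pv_equiv track=rewrite | github.com/jaekwanyda/algorithm | 프로그래머스/3/81303. 표 편집/표 편집.py | solution
-- ===== SOURCE A (Python) =====
-- class Node:
--     def __init__(self, idx):
--         self.idx = idx
--         self.prev = None
--         self.next = None
--
-- def solution(n, k, cmd):
--     table = [Node(i) for i in range(n)]
--     for i in range(1,n):
--         table[i].prev = table[i-1]
--     for i in range(n-1):
--         table[i].next = table[i+1]
--     current_row = table[k]
--     deleted_rows = []
--
--     for command in cmd:
--         if command[0] == 'U':
--             x = int(command.split()[1])
--             for _ in range(x):
--                 if current_row.prev: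
--                     current_row = current_row.prev
--         elif command[0] == 'D':
--             x = int(command.split()[1])
--             for _ in range(x):
--                 if current_row.next:
--                     current_row = current_row.next
--         elif command[0] == 'C':
--             deleted_rows.append(current_row)
--             prev_row = current_row.prev
--             next_row = current_row.next
--             if prev_row:
--                 prev_row.next = next_row
--             if next_row:
--                 next_row.prev = prev_row
--             if not next_row:
--                 current_row = prev_row
--             else:
--                 current_row = next_row
--         elif command[0] == 'Z':
--             row_to_restore = deleted_rows.pop()
--             prev_row = row_to_restore.prev
--             next_row = row_to_restore.next
--             if prev_row:
--                 prev_row.next = row_to_restore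
--             if next_row:
--                 next_row.prev = row_to_restore
--
--     result = ['O'] * n
--     for row in deleted_rows:
--         result[row.idx] = 'X'
--
--     return ''.join(result)
-- ===== SOURCE B (Python) =====
-- def solution(n, k, cmd):
--     alive = list(range(n))
--     dead = []
--     pos = range(n)[k]  # row k, with Python's usual sequence-index semantics (same as A's table[k])
--     for c in cmd:
--         if c[0] == 'U':
--             pos = max(0, pos - int(c.split()[1]))
--         elif c[0] == 'D':
--             pos = min(len(alive) - 1, pos + int(c.split()[1]))
--         elif c[0] == 'C':
--             dead.append((alive.pop(pos), pos))
--             if pos == len(alive):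
--                 pos -= 1
--         elif c[0] == 'Z':
--             idx, p = dead.pop()
--             alive.insert(p, idx)
--             if p <= pos:
--                 pos += 1
--     res = ['O'] * n
--     for idx, _ in dead:
--         res[idx] = 'X'
--     return ''.join(res)
-- ===== Notes on version B (the rewrite author's own statement) =====
-- stated objective: faster
-- what changed: Replaces the doubly-linked-list pointer simulation (walking one node per step on 'U x'/'D x') by a sorted array of visible rows plus a cursor index moved by clamped arithmetic, with a LIFO stack of (row, position) pairs for delete/restore.
-- outside the precondition, e.g. on solution(3, 1, ['U -1', 'C']): A returns 'OXO', B returns 'OOX'; on solution(1, 0, ['C']): A returns 'X', B returns 'X'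
import Mathlib
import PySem

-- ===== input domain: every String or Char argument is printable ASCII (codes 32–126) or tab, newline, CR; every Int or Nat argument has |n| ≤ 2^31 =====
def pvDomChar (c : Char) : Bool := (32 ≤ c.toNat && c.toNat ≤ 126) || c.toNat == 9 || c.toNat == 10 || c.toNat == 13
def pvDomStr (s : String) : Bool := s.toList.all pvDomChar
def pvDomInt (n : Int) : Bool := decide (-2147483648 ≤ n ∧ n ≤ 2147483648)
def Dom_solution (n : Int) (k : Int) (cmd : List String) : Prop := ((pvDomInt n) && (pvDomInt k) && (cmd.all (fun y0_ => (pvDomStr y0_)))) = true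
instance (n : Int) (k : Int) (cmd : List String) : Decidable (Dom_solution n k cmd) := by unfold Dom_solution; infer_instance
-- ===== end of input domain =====

-- B replaces A's doubly-linked-list simulation (one pointer step per unit of 'U x'/'D x') by a sorted
-- array of visible rows plus a cursor index moved by clamped arithmetic (objective: faster U/D handling).

-- ===== PORT A =====
-- A's mutable Node.prev/Node.next pointers are modelled as heaps (Int → Option Int) keyed by the
-- node's idx (nodes are in bijection with their idx); a None pointer is `none`.
-- Where the Python raises (only outside Pre_solution) the port leaves the state unchanged.

-- int(command.split()[1]) — this very expression occurs verbatim in both Pythons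
def pvSecondInt? (c : String) : Option Int :=
  match PySem.List.pyGet? (PySem.Str.split₀ c) 1 with
  | some t => PySem.Int.ofStr? t
  | none => none

structure PvStA where
  prev : Int → Option Int
  next : Int → Option Int
  cur : Option Int
  dead : List Int

-- for _ in range(x): if current_row.prev: current_row = current_row.prev
def pvWalkU (prevH : Int → Option Int) : Nat → Option Int → Option Int
  | 0, c => c
  | _+1, none => none
  | m+1, some c => pvWalkU prevH m (some (match prevH c with | some p => p | none => c))

def pvWalkD (nextH : Int → Option Int) : Nat → Option Int → Option Int
  | 0, c => c
  | _+1, none => none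
  | m+1, some c => pvWalkD nextH m (some (match nextH c with | some q => q | none => c))

def pvStepA (st : PvStA) (command : String) : PvStA :=
  if PySem.Str.pyGet? command 0 = some 'U' then
    match pvSecondInt? command with
    | some x => { st with cur := pvWalkU st.prev x.toNat st.cur }
    | none => st
  else if PySem.Str.pyGet? command 0 = some 'D' then
    match pvSecondInt? command with
    | some x => { st with cur := pvWalkD st.next x.toNat st.cur }
    | none => st
  else if PySem.Str.pyGet? command 0 = some 'C' then
    match st.cur with
    | none => st
    | some v =>
      let pr := st.prev v
      let nx := st.next v
      let next' := match pr with | some p => (fun j => if j = p then nx else st.next j) | none => st.next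
      let prev' := match nx with | some q => (fun j => if j = q then pr else st.prev j) | none => st.prev
      { prev := prev', next := next',
        cur := match nx with | none => pr | some _ => nx,
        dead := st.dead ++ [v] }
  else if PySem.Str.pyGet? command 0 = some 'Z' then
    match st.dead.getLast? with
    | none => st
    | some v =>
      let pr := st.prev v
      let nx := st.next v
      let next' := match pr with | some p => (fun j => if j = p then some v else st.next j) | none => st.next
      let prev' := match nx with | some q => (fun j => if j = q then some v else st.prev j) | none => st.prev
      { prev := prev', next := next', cur := st.cur, dead := st.dead.dropLast }
  else st

-- for i in range(1,n): table[i].prev = table[i-1]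
def pvInitPrev (n : Int) : Int → Option Int :=
  (PySem.List.pyRange 1 n).foldl (fun h i => fun j => if j = i then some (i - 1) else h j)
    (fun _ => none)

-- for i in range(n-1): table[i].next = table[i+1]
def pvInitNext (n : Int) : Int → Option Int :=
  (PySem.List.pyRange 0 (n - 1)).foldl (fun h i => fun j => if j = i then some (i + 1) else h j)
    (fun _ => none)

def solution (n : Int) (k : Int) (cmd : List String) : String :=
  let st0 : PvStA := { prev := pvInitPrev n, next := pvInitNext n,
                       cur := PySem.List.pyGet? (PySem.List.pyRange 0 n) k, dead := [] }
  let st := cmd.foldl pvStepA st0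
  let result := st.dead.foldl (fun r v => PySem.List.pySetD r v 'X') (List.replicate n.toNat 'O')
  String.ofList result

-- ===== PORT B =====
structure PvStB where
  alive : List Int
  dead : List (Int × Int)
  pos : Int

def pvStepB (st : PvStB) (c : String) : PvStB :=
  if PySem.Str.pyGet? c 0 = some 'U' then
    match pvSecondInt? c with
    | some x => { st with pos := max 0 (st.pos - x) }
    | none => st
  else if PySem.Str.pyGet? c 0 = some 'D' then
    match pvSecondInt? c with
    | some x => { st with pos := min ((st.alive.length : Int) - 1) (st.pos + x) }
    | none => st
  else if PySem.Str.pyGet? c 0 = some 'C' then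
    match PySem.List.pop? st.alive st.pos with
    | none => st
    | some (v, alive') =>
      { alive := alive',
        dead := st.dead ++ [(v, st.pos)],
        pos := if st.pos = (alive'.length : Int) then st.pos - 1 else st.pos }
  else if PySem.Str.pyGet? c 0 = some 'Z' then
    match st.dead.getLast? with
    | none => st
    | some (v, p) =>
      { alive := PySem.List.insert st.alive p v,
        dead := st.dead.dropLast,
        pos := if p ≤ st.pos then st.pos + 1 else st.pos }
  else st

def solution_alt (n : Int) (k : Int) (cmd : List String) : String :=
  -- pos = range(n)[k]; the raising case (pyGet? = none) lies outside Pre_solution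
  let st0 : PvStB := { alive := PySem.List.pyRange 0 n, dead := [],
                       pos := (PySem.List.pyGet? (PySem.List.pyRange 0 n) k).getD 0 }
  let st := cmd.foldl pvStepB st0
  let result := st.dead.foldl (fun r e => PySem.List.pySetD r e.1 'X') (List.replicate n.toNat 'O')
  String.ofList result

-- ===== PRECONDITION & SPEC =====
-- Pre_solution restricts to the problem's natural domain: at least one row, -n ≤ k < n (both
-- programs index row k with Python's sequence semantics and raise outside that range), commands
-- nonempty with 'U'/'D' commands carrying a nonnegative parseable argument (A silently ignores a
-- negative argument because range(x) is empty), every prefix having #'Z' ≤ #'C', and never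
-- deleting the last remaining row (A raises on a 'Z' with nothing deleted and, except when no
-- effectful command follows, after the table becomes empty).
def pvCmdOK (c : String) : Bool :=
  (!(c == "")) &&
  (if PySem.Str.pyGet? c 0 = some 'U' ∨ PySem.Str.pyGet? c 0 = some 'D' then
     match PySem.Int.ofStr? ((PySem.Str.split₀ c).getD 1 "") with
     | some v => decide (0 ≤ v)
     | none => false
   else true)

def pvCzOK (n : Int) : Int → List String → Bool
  | _, [] => true
  | d, c :: rest =>
    if PySem.Str.pyGet? c 0 = some 'C' then decide (d + 1 < n) && pvCzOK n (d + 1) rest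
    else if PySem.Str.pyGet? c 0 = some 'Z' then decide (0 < d) && pvCzOK n (d - 1) rest
    else pvCzOK n d rest

def Pre_solution (n : Int) (k : Int) (cmd : List String) : Prop :=
  1 ≤ n ∧ -n ≤ k ∧ k < n ∧ cmd.all pvCmdOK = true ∧ pvCzOK n 0 cmd = true

instance (n : Int) (k : Int) (cmd : List String) : Decidable (Pre_solution n k cmd) := by
  unfold Pre_solution; infer_instance

def pvWitness_solution : Int × Int × List String := (4, 1, ["D 2", "C", "C", "Z", "U 3", "C"])

def Spec_solution (n : Int) (k : Int) (cmd : List String) (out : String) : Prop := out = solution_alt n k cmd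
instance (n : Int) (k : Int) (cmd : List String) (out : String) : Decidable (Spec_solution n k cmd out) := by unfold Spec_solution; infer_instance

-- ===== CLAIM (what is proved, stated in full; the proofs are below) =====
def Claim_equal_solution : Prop := ∀ (n : Int) (k : Int) (cmd : List String), Dom_solution n k cmd → Pre_solution n k cmd → Spec_solution n k cmd (solution n k cmd)

-- ===== LEMMAS AND PROOFS =====

-- greatest element below x / least element above x of a finite set given as a list
def pvMaxBelow (S : List Int) (x : Int) : Option Int := (S.filter (fun y => decide (y < x))).max?
def pvMinAbove (S : List Int) (x : Int) : Option Int := (S.filter (fun y => decide (x < y))).min?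

-- the rows a node's pointers can refer to: the alive rows plus the rows deleted after it
-- (deadTop is the deleted stack, TOP FIRST, as an idx list)
def pvVisAux (alive : List Int) : List Int → Int → Option (List Int)
  | [], _ => none
  | v :: rest, x => if x = v then some alive else pvVisAux (v :: alive) rest x

def pvPrevOf (alive : List Int) (deadTop : List Int) (x : Int) : Option Int :=
  if x ∈ alive then pvMaxBelow alive x
  else (pvVisAux alive deadTop x).bind (fun S => pvMaxBelow S x)

def pvNextOf (alive : List Int) (deadTop : List Int) (x : Int) : Option Int :=
  if x ∈ alive then pvMinAbove alive x
  else (pvVisAux alive deadTop x).bind (fun S => pvMinAbove S x)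

def pvLtv (v : Int) : Int → Bool := fun y => decide (y < v)

-- sorted reinsertion of v into l
def pvInsort (v : Int) (l : List Int) : List Int :=
  l.filter (pvLtv v) ++ v :: l.filter (fun y => !(pvLtv v y))

-- well-formedness of the deleted stack (TOP FIRST): each entry records the position at which it
-- is to be reinserted, valid once every entry above it has been restored
def pvWfD (alive : List Int) : List (Int × Int) → Prop
  | [] => True
  | (v, p) :: rest =>
      v ∉ alive ∧ p = ((alive.filter (pvLtv v)).length : Int) ∧ pvWfD (pvInsort v alive) rest

structure PvInv (n : Int) (sa : PvStA) (sb : PvStB) : Prop where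
  sorted : sb.alive.Pairwise (· < ·)
  ne : sb.alive ≠ []
  pos0 : 0 ≤ sb.pos
  posLt : sb.pos < (sb.alive.length : Int)
  len : (sb.alive.length : Int) = n - sb.dead.length
  cur : sa.cur = sb.alive[sb.pos.toNat]?
  deadEq : sa.dead = sb.dead.map Prod.fst
  nodup : (sb.dead.map Prod.fst).Nodup
  disj : ∀ v ∈ sb.dead.map Prod.fst, v ∉ sb.alive
  wf : pvWfD sb.alive sb.dead.reverse
  hp : ∀ x, sa.prev x = pvPrevOf sb.alive ((sb.dead.map Prod.fst).reverse) x
  hn : ∀ x, sa.next x = pvNextOf sb.alive ((sb.dead.map Prod.fst).reverse) x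

-- ---- extremum characterizations ----

lemma pvMaxBelow_eq_some_iff {S : List Int} {x m : Int} :
    pvMaxBelow S x = some m ↔ (m ∈ S ∧ m < x ∧ ∀ y ∈ S, y < x → y ≤ m) := by
  unfold pvMaxBelow
  rw [List.max?_eq_some_iff]
  simp only [List.mem_filter, decide_eq_true_eq]
  constructor
  · rintro ⟨⟨hm, hmx⟩, h⟩
    exact ⟨hm, hmx, fun y hy hyx => h y ⟨hy, hyx⟩⟩
  · rintro ⟨hm, hmx, h⟩
    exact ⟨⟨hm, hmx⟩, fun y ⟨hy, hyx⟩ => h y hy hyx⟩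

lemma pvMinAbove_eq_some_iff {S : List Int} {x m : Int} :
    pvMinAbove S x = some m ↔ (m ∈ S ∧ x < m ∧ ∀ y ∈ S, x < y → m ≤ y) := by
  unfold pvMinAbove
  rw [List.min?_eq_some_iff]
  simp only [List.mem_filter, decide_eq_true_eq]
  constructor
  · rintro ⟨⟨hm, hmx⟩, h⟩
    exact ⟨hm, hmx, fun y hy hyx => h y ⟨hy, hyx⟩⟩
  · rintro ⟨hm, hmx, h⟩
    exact ⟨⟨hm, hmx⟩, fun y ⟨hy, hyx⟩ => h y hy hyx⟩

lemma pvMaxBelow_eq_none_iff {S : List Int} {x : Int} :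
    pvMaxBelow S x = none ↔ ∀ y ∈ S, ¬ y < x := by
  unfold pvMaxBelow
  rw [List.max?_eq_none_iff, List.filter_eq_nil_iff]
  simp

lemma pvMinAbove_eq_none_iff {S : List Int} {x : Int} :
    pvMinAbove S x = none ↔ ∀ y ∈ S, ¬ x < y := by
  unfold pvMinAbove
  rw [List.min?_eq_none_iff, List.filter_eq_nil_iff]
  simp

lemma pvMaxBelow_perm {S S' : List Int} (h : S.Perm S') (x : Int) :
    pvMaxBelow S x = pvMaxBelow S' x := by
  cases e : pvMaxBelow S' x with
  | none =>
    rw [pvMaxBelow_eq_none_iff] at e ⊢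
    exact fun y hy => e y (h.mem_iff.mp hy)
  | some m =>
    rw [pvMaxBelow_eq_some_iff] at e ⊢
    exact ⟨h.mem_iff.mpr e.1, e.2.1, fun y hy => e.2.2 y (h.mem_iff.mp hy)⟩

lemma pvMinAbove_perm {S S' : List Int} (h : S.Perm S') (x : Int) :
    pvMinAbove S x = pvMinAbove S' x := by
  cases e : pvMinAbove S' x with
  | none =>
    rw [pvMinAbove_eq_none_iff] at e ⊢
    exact fun y hy => e y (h.mem_iff.mp hy)
  | some m =>
    rw [pvMinAbove_eq_some_iff] at e ⊢
    exact ⟨h.mem_iff.mpr e.1, e.2.1, fun y hy => e.2.2 y (h.mem_iff.mp hy)⟩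

-- ---- visibility lemmas ----

lemma pvVisAux_congr (f : List Int → Option Int) (hf : ∀ S S', S.Perm S' → f S = f S') :
    ∀ (d : List Int) (a a' : List Int) (x : Int), a.Perm a' →
      (pvVisAux a d x).bind f = (pvVisAux a' d x).bind f := by
  intro d
  induction d with
  | nil => intro a a' x _; simp [pvVisAux]
  | cons v rest ih =>
    intro a a' x hperm
    by_cases hx : x = v
    · simp [pvVisAux, hx, hf a a' hperm]
    · simp only [pvVisAux, if_neg hx]
      exact ih (v :: a) (v :: a') x (hperm.cons v)

-- ---- sorted split lemmas ----

lemma pvSplit_facts {A Bd : List Int} {v : Int} (hpw : (A ++ v :: Bd).Pairwise (· < ·)) :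
    (∀ a ∈ A, a < v) ∧ (∀ b ∈ Bd, v < b) ∧ A.Pairwise (· < ·) ∧ Bd.Pairwise (· < ·) ∧
      (∀ a ∈ A, ∀ b ∈ Bd, a < b) ∧ (A ++ Bd).Pairwise (· < ·) := by
  rw [List.pairwise_append] at hpw
  obtain ⟨hA, hvB, hcross⟩ := hpw
  rw [List.pairwise_cons] at hvB
  refine ⟨fun a ha => hcross a ha v (List.mem_cons_self ..), hvB.1, hA, hvB.2,
    fun a ha b hb => hcross a ha b (List.mem_cons_of_mem _ hb), ?_⟩
  rw [List.pairwise_append]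
  exact ⟨hA, hvB.2, fun a ha b hb => hcross a ha b (List.mem_cons_of_mem _ hb)⟩

lemma pvFilter_split {A Bd : List Int} {v : Int}
    (hAv : ∀ a ∈ A, a < v) (hvB : ∀ b ∈ Bd, v < b) :
    (A ++ v :: Bd).filter (pvLtv v) = A ∧ (A ++ Bd).filter (pvLtv v) = A ∧
    (A ++ v :: Bd).filter (fun y => !(pvLtv v y)) = v :: Bd ∧
    (A ++ Bd).filter (fun y => !(pvLtv v y)) = Bd := by
  have hA1 : A.filter (pvLtv v) = A := by
    rw [List.filter_eq_self]; intro a ha; simpa [pvLtv] using hAv a ha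
  have hB1 : Bd.filter (pvLtv v) = [] := by
    rw [List.filter_eq_nil_iff]; intro b hb; simp [pvLtv]; exact le_of_lt (hvB b hb)
  have hA2 : A.filter (fun y => !(pvLtv v y)) = [] := by
    rw [List.filter_eq_nil_iff]; intro a ha; simp [pvLtv]; exact hAv a ha
  have hB2 : Bd.filter (fun y => !(pvLtv v y)) = Bd := by
    rw [List.filter_eq_self]; intro b hb; simp [pvLtv]; exact le_of_lt (hvB b hb)
  have hvv1 : pvLtv v v = false := by simp [pvLtv]
  refine ⟨?_, ?_, ?_, ?_⟩
  · simp only [List.filter_append, List.filter_cons, hvv1, hA1, hB1]; simp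
  · simp only [List.filter_append, hA1, hB1]; simp
  · simp only [List.filter_append, List.filter_cons, hvv1, hA2, hB2]; simp
  · simp only [List.filter_append, hA2, hB2]; simp

lemma pvMaxBelow_split {A Bd : List Int} {v : Int}
    (hAv : ∀ a ∈ A, a < v) (hvB : ∀ b ∈ Bd, v < b) :
    pvMaxBelow (A ++ v :: Bd) v = A.max? ∧ pvMaxBelow (A ++ Bd) v = A.max? ∧
    pvMinAbove (A ++ v :: Bd) v = Bd.min? ∧ pvMinAbove (A ++ Bd) v = Bd.min? := by
  obtain ⟨h1, h2, _, _⟩ := pvFilter_split hAv hvB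
  constructor
  · unfold pvMaxBelow pvLtv at *; rw [h1]
  constructor
  · unfold pvMaxBelow pvLtv at *; rw [h2]
  have hB1 : Bd.filter (fun y => decide (v < y)) = Bd := by
    rw [List.filter_eq_self]; intro b hb; simpa using hvB b hb
  have hA1 : A.filter (fun y => decide (v < y)) = [] := by
    rw [List.filter_eq_nil_iff]; intro a ha; simpa using le_of_lt (hAv a ha)
  constructor
  · unfold pvMinAbove; rw [List.filter_append, List.filter_cons]
    simp [hA1, hB1]
  · unfold pvMinAbove; rw [List.filter_append]
    simp [hA1, hB1]

-- the extrema around x ∈ A ++ Bd do not change when v (between A and Bd) is inserted,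
-- provided x is not v's immediate neighbour
lemma pvMinAbove_skip {A Bd : List Int} {v x : Int}
    (hAv : ∀ a ∈ A, a < v) (hvB : ∀ b ∈ Bd, v < b)
    (hx : x ∈ A ++ Bd) (hq : ∀ q, A.max? = some q → x ≠ q) :
    pvMinAbove (A ++ Bd) x = pvMinAbove (A ++ v :: Bd) x := by
  rcases List.mem_append.mp hx with hxA | hxB
  · have hne : A ≠ [] := by rintro rfl; simp at hxA
    obtain ⟨q, hqe⟩ : ∃ q, A.max? = some q := by
      cases e : A.max? with
      | none => exact absurd (List.max?_eq_none_iff.mp e) hne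
      | some q => exact ⟨q, rfl⟩
    have hspec := List.max?_eq_some_iff.mp hqe
    have hxq : x < q := lt_of_le_of_ne (hspec.2 x hxA) (hq q hqe)
    cases e : pvMinAbove (A ++ Bd) x with
    | none =>
      exfalso
      rw [pvMinAbove_eq_none_iff] at e
      exact e q (List.mem_append_left _ hspec.1) hxq
    | some m =>
      symm
      rw [pvMinAbove_eq_some_iff] at e ⊢
      have hmq : m ≤ q := e.2.2 q (List.mem_append_left _ hspec.1) hxq
      have hmv : m < v := lt_of_le_of_lt hmq (hAv q hspec.1)
      refine ⟨?_, e.2.1, ?_⟩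
      · rcases List.mem_append.mp e.1 with h | h
        · exact List.mem_append_left _ h
        · exact List.mem_append_right _ (List.mem_cons_of_mem _ h)
      · intro y hy hxy
        rcases List.mem_append.mp hy with h | h
        · exact e.2.2 y (List.mem_append_left _ h) hxy
        · rcases List.mem_cons.mp h with rfl | h
          · exact le_of_lt hmv
          · exact e.2.2 y (List.mem_append_right _ h) hxy
  · have hvx : v < x := hvB x hxB
    cases e : pvMinAbove (A ++ Bd) x with
    | none =>
      symm
      rw [pvMinAbove_eq_none_iff] at e ⊢
      intro y hy
      rcases List.mem_append.mp hy with h | h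
      · exact e y (List.mem_append_left _ h)
      · rcases List.mem_cons.mp h with rfl | h
        · omega
        · exact e y (List.mem_append_right _ h)
    | some m =>
      symm
      rw [pvMinAbove_eq_some_iff] at e ⊢
      refine ⟨?_, e.2.1, ?_⟩
      · rcases List.mem_append.mp e.1 with h | h
        · exact List.mem_append_left _ h
        · exact List.mem_append_right _ (List.mem_cons_of_mem _ h)
      · intro y hy hxy
        rcases List.mem_append.mp hy with h | h
        · exact e.2.2 y (List.mem_append_left _ h) hxy
        · rcases List.mem_cons.mp h with rfl | h
          · omega
          · exact e.2.2 y (List.mem_append_right _ h) hxy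

lemma pvMaxBelow_skip {A Bd : List Int} {v x : Int}
    (hAv : ∀ a ∈ A, a < v) (hvB : ∀ b ∈ Bd, v < b)
    (hx : x ∈ A ++ Bd) (hq : ∀ q, Bd.min? = some q → x ≠ q) :
    pvMaxBelow (A ++ Bd) x = pvMaxBelow (A ++ v :: Bd) x := by
  rcases List.mem_append.mp hx with hxA | hxB
  · have hxv : x < v := hAv x hxA
    cases e : pvMaxBelow (A ++ Bd) x with
    | none =>
      symm
      rw [pvMaxBelow_eq_none_iff] at e ⊢
      intro y hy
      rcases List.mem_append.mp hy with h | h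
      · exact e y (List.mem_append_left _ h)
      · rcases List.mem_cons.mp h with rfl | h
        · omega
        · exact e y (List.mem_append_right _ h)
    | some m =>
      symm
      rw [pvMaxBelow_eq_some_iff] at e ⊢
      refine ⟨?_, e.2.1, ?_⟩
      · rcases List.mem_append.mp e.1 with h | h
        · exact List.mem_append_left _ h
        · exact List.mem_append_right _ (List.mem_cons_of_mem _ h)
      · intro y hy hxy
        rcases List.mem_append.mp hy with h | h
        · exact e.2.2 y (List.mem_append_left _ h) hxy
        · rcases List.mem_cons.mp h with rfl | h
          · omega
          · exact e.2.2 y (List.mem_append_right _ h) hxy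
  · have hne : Bd ≠ [] := by rintro rfl; simp at hxB
    obtain ⟨q, hqe⟩ : ∃ q, Bd.min? = some q := by
      cases e : Bd.min? with
      | none => exact absurd (List.min?_eq_none_iff.mp e) hne
      | some q => exact ⟨q, rfl⟩
    have hspec := List.min?_eq_some_iff.mp hqe
    have hxq : q < x := lt_of_le_of_ne (hspec.2 x hxB) (Ne.symm (hq q hqe))
    cases e : pvMaxBelow (A ++ Bd) x with
    | none =>
      exfalso
      rw [pvMaxBelow_eq_none_iff] at e
      exact e q (List.mem_append_right _ hspec.1) hxq
    | some m =>
      symm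
      rw [pvMaxBelow_eq_some_iff] at e ⊢
      have hmq : q ≤ m := e.2.2 q (List.mem_append_right _ hspec.1) hxq
      have hmv : v < m := lt_of_lt_of_le (hvB q hspec.1) hmq
      refine ⟨?_, e.2.1, ?_⟩
      · rcases List.mem_append.mp e.1 with h | h
        · exact List.mem_append_left _ h
        · exact List.mem_append_right _ (List.mem_cons_of_mem _ h)
      · intro y hy hxy
        rcases List.mem_append.mp hy with h | h
        · exact e.2.2 y (List.mem_append_left _ h) hxy
        · rcases List.mem_cons.mp h with rfl | h
          · exact le_of_lt hmv
          · exact e.2.2 y (List.mem_append_right _ h) hxy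

lemma pvNotMem_split {A Bd : List Int} {v : Int}
    (hAv : ∀ a ∈ A, a < v) (hvB : ∀ b ∈ Bd, v < b) : v ∉ A ++ Bd := by
  intro h
  rcases List.mem_append.mp h with h | h
  · exact absurd (hAv v h) (lt_irrefl v)
  · exact absurd (hvB v h) (lt_irrefl v)

-- ---- the four heap-update lemmas ----

lemma pvNextOf_delete {A Bd dT : List Int} {v : Int}
    (hpw : (A ++ v :: Bd).Pairwise (· < ·))
    (hdT : ∀ u ∈ dT, u ∉ (A ++ v :: Bd)) (x : Int) :
    (match pvMaxBelow (A ++ v :: Bd) v with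
     | some q => if x = q then pvMinAbove (A ++ v :: Bd) v else pvNextOf (A ++ v :: Bd) dT x
     | none => pvNextOf (A ++ v :: Bd) dT x)
    = pvNextOf (A ++ Bd) (v :: dT) x := by
  obtain ⟨hAv, hvB, _, _, _, _⟩ := pvSplit_facts hpw
  obtain ⟨hmb, hmb', hma, hma'⟩ := pvMaxBelow_split hAv hvB
  have hvl' : v ∉ A ++ Bd := pvNotMem_split hAv hvB
  have hperm : (v :: (A ++ Bd)).Perm (A ++ v :: Bd) := List.perm_middle.symm
  rw [hmb]
  by_cases hxv : x = v
  · rw [hxv]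
    have h1 : pvNextOf (A ++ v :: Bd) dT v = Bd.min? := by
      unfold pvNextOf
      rw [if_pos (by simp), hma]
    have h2 : pvNextOf (A ++ Bd) (v :: dT) v = Bd.min? := by
      unfold pvNextOf
      rw [if_neg hvl']
      simp only [pvVisAux]
      exact hma'
    cases e : A.max? with
    | none => dsimp only; rw [h1, h2]
    | some q =>
      have hvq : v ≠ q := by
        have hqA := (List.max?_eq_some_iff.mp e).1
        intro h; subst h; exact absurd (hAv _ hqA) (lt_irrefl _)
      dsimp only; rw [if_neg hvq, h1, h2]
  · by_cases hxl : x ∈ A ++ Bd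
    · have hrhs : pvNextOf (A ++ Bd) (v :: dT) x = pvMinAbove (A ++ Bd) x := by
        unfold pvNextOf; rw [if_pos hxl]
      have hxl2 : x ∈ A ++ v :: Bd := hperm.mem_iff.mp (List.mem_cons_of_mem _ hxl)
      have hlhs0 : pvNextOf (A ++ v :: Bd) dT x = pvMinAbove (A ++ v :: Bd) x := by
        unfold pvNextOf; rw [if_pos hxl2]
      cases e : A.max? with
      | none =>
        dsimp only; rw [hlhs0, hrhs]
        exact (pvMinAbove_skip hAv hvB hxl (by intro q h; rw [e] at h; cases h)).symm
      | some q =>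
        dsimp only
        by_cases hxq : x = q
        · rw [if_pos hxq, hma, hrhs, hxq]
          have hspec := List.max?_eq_some_iff.mp e
          have hqv : q < v := hAv q hspec.1
          cases e2 : Bd.min? with
          | none =>
            symm
            rw [pvMinAbove_eq_none_iff]
            have hBnil : Bd = [] := List.min?_eq_none_iff.mp e2
            subst hBnil
            intro y hy
            simp only [List.append_nil] at hy
            have := hspec.2 y hy
            omega
          | some m =>
            symm
            rw [pvMinAbove_eq_some_iff]
            have hspec2 := List.min?_eq_some_iff.mp e2
            have hvm : v < m := hvB m hspec2.1
            refine ⟨List.mem_append_right _ hspec2.1, by omega, ?_⟩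
            intro y hy hqy
            rcases List.mem_append.mp hy with h | h
            · exact absurd hqy (not_lt.mpr (hspec.2 y h))
            · exact hspec2.2 y h
        · rw [if_neg hxq, hlhs0, hrhs]
          exact (pvMinAbove_skip hAv hvB hxl (fun q' hq' => by rw [e] at hq'; cases hq'; exact hxq)).symm
    · have hxl2 : x ∉ A ++ v :: Bd := by
        intro h
        rcases List.mem_cons.mp (hperm.mem_iff.mpr h) with h' | h'
        · exact hxv h'
        · exact hxl h'
      have hlhs0 : pvNextOf (A ++ v :: Bd) dT x
          = (pvVisAux (A ++ v :: Bd) dT x).bind (fun S => pvMinAbove S x) := by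
        unfold pvNextOf; rw [if_neg hxl2]
      have hrhs : pvNextOf (A ++ Bd) (v :: dT) x
          = (pvVisAux (v :: (A ++ Bd)) dT x).bind (fun S => pvMinAbove S x) := by
        unfold pvNextOf
        rw [if_neg hxl]
        simp only [pvVisAux, if_neg hxv]
      have hcongr := pvVisAux_congr (fun S => pvMinAbove S x)
        (fun S S' h => pvMinAbove_perm h x) dT (v :: (A ++ Bd)) (A ++ v :: Bd) x hperm
      cases e : A.max? with
      | none => dsimp only; rw [hlhs0, hrhs, hcongr]
      | some q =>
        have hxq : x ≠ q := by
          intro h; subst h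
          exact hxl2 (List.mem_append_left _ (List.max?_eq_some_iff.mp e).1)
        dsimp only; rw [if_neg hxq, hlhs0, hrhs, hcongr]

lemma pvPrevOf_delete {A Bd dT : List Int} {v : Int}
    (hpw : (A ++ v :: Bd).Pairwise (· < ·))
    (hdT : ∀ u ∈ dT, u ∉ (A ++ v :: Bd)) (x : Int) :
    (match pvMinAbove (A ++ v :: Bd) v with
     | some q => if x = q then pvMaxBelow (A ++ v :: Bd) v else pvPrevOf (A ++ v :: Bd) dT x
     | none => pvPrevOf (A ++ v :: Bd) dT x)
    = pvPrevOf (A ++ Bd) (v :: dT) x := by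
  obtain ⟨hAv, hvB, _, _, _, _⟩ := pvSplit_facts hpw
  obtain ⟨hmb, hmb', hma, hma'⟩ := pvMaxBelow_split hAv hvB
  have hvl' : v ∉ A ++ Bd := pvNotMem_split hAv hvB
  have hperm : (v :: (A ++ Bd)).Perm (A ++ v :: Bd) := List.perm_middle.symm
  rw [hma]
  by_cases hxv : x = v
  · rw [hxv]
    have h1 : pvPrevOf (A ++ v :: Bd) dT v = A.max? := by
      unfold pvPrevOf
      rw [if_pos (by simp), hmb]
    have h2 : pvPrevOf (A ++ Bd) (v :: dT) v = A.max? := by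
      unfold pvPrevOf
      rw [if_neg hvl']
      simp only [pvVisAux]
      exact hmb'
    cases e : Bd.min? with
    | none => dsimp only; rw [h1, h2]
    | some q =>
      have hvq : v ≠ q := by
        have hqB := (List.min?_eq_some_iff.mp e).1
        intro h; subst h; exact absurd (hvB _ hqB) (lt_irrefl _)
      dsimp only; rw [if_neg hvq, h1, h2]
  · by_cases hxl : x ∈ A ++ Bd
    · have hrhs : pvPrevOf (A ++ Bd) (v :: dT) x = pvMaxBelow (A ++ Bd) x := by
        unfold pvPrevOf; rw [if_pos hxl]
      have hxl2 : x ∈ A ++ v :: Bd := hperm.mem_iff.mp (List.mem_cons_of_mem _ hxl)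
      have hlhs0 : pvPrevOf (A ++ v :: Bd) dT x = pvMaxBelow (A ++ v :: Bd) x := by
        unfold pvPrevOf; rw [if_pos hxl2]
      cases e : Bd.min? with
      | none =>
        dsimp only; rw [hlhs0, hrhs]
        exact (pvMaxBelow_skip hAv hvB hxl (by intro q h; rw [e] at h; cases h)).symm
      | some q =>
        dsimp only
        by_cases hxq : x = q
        · rw [if_pos hxq, hmb, hrhs, hxq]
          have hspec := List.min?_eq_some_iff.mp e
          have hqv : v < q := hvB q hspec.1
          cases e2 : A.max? with
          | none =>
            symm
            rw [pvMaxBelow_eq_none_iff]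
            have hAnil : A = [] := List.max?_eq_none_iff.mp e2
            subst hAnil
            intro y hy
            simp only [List.nil_append] at hy
            have := hspec.2 y hy
            omega
          | some m =>
            symm
            rw [pvMaxBelow_eq_some_iff]
            have hspec2 := List.max?_eq_some_iff.mp e2
            have hvm : m < v := hAv m hspec2.1
            refine ⟨List.mem_append_left _ hspec2.1, by omega, ?_⟩
            intro y hy hqy
            rcases List.mem_append.mp hy with h | h
            · exact hspec2.2 y h
            · exact absurd hqy (not_lt.mpr (hspec.2 y h))
        · rw [if_neg hxq, hlhs0, hrhs]
          exact (pvMaxBelow_skip hAv hvB hxl (fun q' hq' => by rw [e] at hq'; cases hq'; exact hxq)).symm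
    · have hxl2 : x ∉ A ++ v :: Bd := by
        intro h
        rcases List.mem_cons.mp (hperm.mem_iff.mpr h) with h' | h'
        · exact hxv h'
        · exact hxl h'
      have hlhs0 : pvPrevOf (A ++ v :: Bd) dT x
          = (pvVisAux (A ++ v :: Bd) dT x).bind (fun S => pvMaxBelow S x) := by
        unfold pvPrevOf; rw [if_neg hxl2]
      have hrhs : pvPrevOf (A ++ Bd) (v :: dT) x
          = (pvVisAux (v :: (A ++ Bd)) dT x).bind (fun S => pvMaxBelow S x) := by
        unfold pvPrevOf
        rw [if_neg hxl]
        simp only [pvVisAux, if_neg hxv]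
      have hcongr := pvVisAux_congr (fun S => pvMaxBelow S x)
        (fun S S' h => pvMaxBelow_perm h x) dT (v :: (A ++ Bd)) (A ++ v :: Bd) x hperm
      cases e : Bd.min? with
      | none => dsimp only; rw [hlhs0, hrhs, hcongr]
      | some q =>
        have hxq : x ≠ q := by
          intro h; subst h
          exact hxl2 (List.mem_append_right _ (List.mem_cons_of_mem _ (List.min?_eq_some_iff.mp e).1))
        dsimp only; rw [if_neg hxq, hlhs0, hrhs, hcongr]

lemma pvNextOf_restore {A Bd dT : List Int} {v : Int}
    (hpw : (A ++ v :: Bd).Pairwise (· < ·))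
    (hdT : ∀ u ∈ dT, u ∉ (A ++ v :: Bd)) (x : Int) :
    (match pvMaxBelow (A ++ Bd) v with
     | some q => if x = q then some v else pvNextOf (A ++ Bd) (v :: dT) x
     | none => pvNextOf (A ++ Bd) (v :: dT) x)
    = pvNextOf (A ++ v :: Bd) dT x := by
  obtain ⟨hAv, hvB, _, _, _, _⟩ := pvSplit_facts hpw
  obtain ⟨hmb, hmb', hma, hma'⟩ := pvMaxBelow_split hAv hvB
  have hvl' : v ∉ A ++ Bd := pvNotMem_split hAv hvB
  have hperm : (v :: (A ++ Bd)).Perm (A ++ v :: Bd) := List.perm_middle.symm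
  rw [hmb']
  by_cases hxv : x = v
  · rw [hxv]
    have h2 : pvNextOf (A ++ Bd) (v :: dT) v = Bd.min? := by
      unfold pvNextOf
      rw [if_neg hvl']
      simp only [pvVisAux]
      exact hma'
    have h1 : pvNextOf (A ++ v :: Bd) dT v = Bd.min? := by
      unfold pvNextOf; rw [if_pos (by simp), hma]
    cases e : A.max? with
    | none => dsimp only; rw [h2, h1]
    | some q =>
      have hvq : v ≠ q := by
        have hqA := (List.max?_eq_some_iff.mp e).1
        intro h; subst h; exact absurd (hAv _ hqA) (lt_irrefl _)
      dsimp only; rw [if_neg hvq, h2, h1]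
  · by_cases hxl : x ∈ A ++ Bd
    · have hxl2 : x ∈ A ++ v :: Bd := hperm.mem_iff.mp (List.mem_cons_of_mem _ hxl)
      have hrhs : pvNextOf (A ++ v :: Bd) dT x = pvMinAbove (A ++ v :: Bd) x := by
        unfold pvNextOf; rw [if_pos hxl2]
      have hlhs0 : pvNextOf (A ++ Bd) (v :: dT) x = pvMinAbove (A ++ Bd) x := by
        unfold pvNextOf; rw [if_pos hxl]
      cases e : A.max? with
      | none =>
        dsimp only; rw [hlhs0, hrhs]
        exact pvMinAbove_skip hAv hvB hxl (by intro q h; rw [e] at h; cases h)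
      | some q =>
        dsimp only
        by_cases hxq : x = q
        · rw [if_pos hxq, hrhs, hxq]
          symm
          rw [pvMinAbove_eq_some_iff]
          have hspec := List.max?_eq_some_iff.mp e
          have hqv : q < v := hAv q hspec.1
          refine ⟨List.mem_append_right _ (List.mem_cons_self ..), hqv, ?_⟩
          intro y hy hqy
          rcases List.mem_append.mp hy with h | h
          · exact absurd hqy (not_lt.mpr (hspec.2 y h))
          · rcases List.mem_cons.mp h with rfl | h
            · exact le_refl _
            · exact le_of_lt (hvB y h)
        · rw [if_neg hxq, hlhs0, hrhs]
          exact pvMinAbove_skip hAv hvB hxl (fun q' hq' => by rw [e] at hq'; cases hq'; exact hxq)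
    · have hxl2 : x ∉ A ++ v :: Bd := by
        intro h
        rcases List.mem_cons.mp (hperm.mem_iff.mpr h) with h' | h'
        · exact hxv h'
        · exact hxl h'
      have hrhs : pvNextOf (A ++ v :: Bd) dT x
          = (pvVisAux (A ++ v :: Bd) dT x).bind (fun S => pvMinAbove S x) := by
        unfold pvNextOf; rw [if_neg hxl2]
      have hlhs0 : pvNextOf (A ++ Bd) (v :: dT) x
          = (pvVisAux (v :: (A ++ Bd)) dT x).bind (fun S => pvMinAbove S x) := by
        unfold pvNextOf
        rw [if_neg hxl]
        simp only [pvVisAux, if_neg hxv]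
      have hcongr := pvVisAux_congr (fun S => pvMinAbove S x)
        (fun S S' h => pvMinAbove_perm h x) dT (v :: (A ++ Bd)) (A ++ v :: Bd) x hperm
      cases e : A.max? with
      | none => dsimp only; rw [hlhs0, hrhs, hcongr]
      | some q =>
        have hxq : x ≠ q := by
          intro h; subst h
          exact hxl (List.mem_append_left _ (List.max?_eq_some_iff.mp e).1)
        dsimp only; rw [if_neg hxq, hlhs0, hrhs, hcongr]

lemma pvPrevOf_restore {A Bd dT : List Int} {v : Int}
    (hpw : (A ++ v :: Bd).Pairwise (· < ·))
    (hdT : ∀ u ∈ dT, u ∉ (A ++ v :: Bd)) (x : Int) :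
    (match pvMinAbove (A ++ Bd) v with
     | some q => if x = q then some v else pvPrevOf (A ++ Bd) (v :: dT) x
     | none => pvPrevOf (A ++ Bd) (v :: dT) x)
    = pvPrevOf (A ++ v :: Bd) dT x := by
  obtain ⟨hAv, hvB, _, _, _, _⟩ := pvSplit_facts hpw
  obtain ⟨hmb, hmb', hma, hma'⟩ := pvMaxBelow_split hAv hvB
  have hvl' : v ∉ A ++ Bd := pvNotMem_split hAv hvB
  have hperm : (v :: (A ++ Bd)).Perm (A ++ v :: Bd) := List.perm_middle.symm
  rw [hma']
  by_cases hxv : x = v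
  · rw [hxv]
    have h2 : pvPrevOf (A ++ Bd) (v :: dT) v = A.max? := by
      unfold pvPrevOf
      rw [if_neg hvl']
      simp only [pvVisAux]
      exact hmb'
    have h1 : pvPrevOf (A ++ v :: Bd) dT v = A.max? := by
      unfold pvPrevOf; rw [if_pos (by simp), hmb]
    cases e : Bd.min? with
    | none => dsimp only; rw [h2, h1]
    | some q =>
      have hvq : v ≠ q := by
        have hqB := (List.min?_eq_some_iff.mp e).1
        intro h; subst h; exact absurd (hvB _ hqB) (lt_irrefl _)
      dsimp only; rw [if_neg hvq, h2, h1]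
  · by_cases hxl : x ∈ A ++ Bd
    · have hxl2 : x ∈ A ++ v :: Bd := hperm.mem_iff.mp (List.mem_cons_of_mem _ hxl)
      have hrhs : pvPrevOf (A ++ v :: Bd) dT x = pvMaxBelow (A ++ v :: Bd) x := by
        unfold pvPrevOf; rw [if_pos hxl2]
      have hlhs0 : pvPrevOf (A ++ Bd) (v :: dT) x = pvMaxBelow (A ++ Bd) x := by
        unfold pvPrevOf; rw [if_pos hxl]
      cases e : Bd.min? with
      | none =>
        dsimp only; rw [hlhs0, hrhs]
        exact pvMaxBelow_skip hAv hvB hxl (by intro q h; rw [e] at h; cases h)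
      | some q =>
        dsimp only
        by_cases hxq : x = q
        · rw [if_pos hxq, hrhs, hxq]
          symm
          rw [pvMaxBelow_eq_some_iff]
          have hspec := List.min?_eq_some_iff.mp e
          have hqv : v < q := hvB q hspec.1
          refine ⟨List.mem_append_right _ (List.mem_cons_self ..), hqv, ?_⟩
          intro y hy hqy
          rcases List.mem_append.mp hy with h | h
          · exact le_of_lt (hAv y h)
          · rcases List.mem_cons.mp h with rfl | h
            · exact le_refl _
            · exact absurd hqy (not_lt.mpr (hspec.2 y h))
        · rw [if_neg hxq, hlhs0, hrhs]
          exact pvMaxBelow_skip hAv hvB hxl (fun q' hq' => by rw [e] at hq'; cases hq'; exact hxq)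
    · have hxl2 : x ∉ A ++ v :: Bd := by
        intro h
        rcases List.mem_cons.mp (hperm.mem_iff.mpr h) with h' | h'
        · exact hxv h'
        · exact hxl h'
      have hrhs : pvPrevOf (A ++ v :: Bd) dT x
          = (pvVisAux (A ++ v :: Bd) dT x).bind (fun S => pvMaxBelow S x) := by
        unfold pvPrevOf; rw [if_neg hxl2]
      have hlhs0 : pvPrevOf (A ++ Bd) (v :: dT) x
          = (pvVisAux (v :: (A ++ Bd)) dT x).bind (fun S => pvMaxBelow S x) := by
        unfold pvPrevOf
        rw [if_neg hxl]
        simp only [pvVisAux, if_neg hxv]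
      have hcongr := pvVisAux_congr (fun S => pvMaxBelow S x)
        (fun S S' h => pvMaxBelow_perm h x) dT (v :: (A ++ Bd)) (A ++ v :: Bd) x hperm
      cases e : Bd.min? with
      | none => dsimp only; rw [hlhs0, hrhs, hcongr]
      | some q =>
        have hxq : x ≠ q := by
          intro h; subst h
          exact hxl (List.mem_append_right _ (List.min?_eq_some_iff.mp e).1)
        dsimp only; rw [if_neg hxq, hlhs0, hrhs, hcongr]

-- ---- indexed forms on a sorted list ----

lemma pvGetCongr {l : List Int} {i j : Nat} (h : i = j) (hi : i < l.length) (hj : j < l.length) :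
    l[i] = l[j] := by subst h; rfl

lemma pvMaxBelow_getElem {l : List Int} (hs : l.Pairwise (· < ·)) {i : Nat} (hi : i < l.length) :
    pvMaxBelow l (l[i]) = if i = 0 then none else l[i - 1]? := by
  have hmono : ∀ {a b : Nat} (_ : a < l.length) (hb : b < l.length), a < b → l[a]'(by omega) < l[b] :=
    fun ha hb hab => List.pairwise_iff_getElem.mp hs _ _ ha hb hab
  by_cases h0 : i = 0
  · subst h0
    rw [if_pos rfl, pvMaxBelow_eq_none_iff]
    intro y hy
    obtain ⟨j, hj, rfl⟩ := List.mem_iff_getElem.mp hy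
    rcases Nat.eq_zero_or_pos j with rfl | hj0
    · exact lt_irrefl _
    · exact not_lt.mpr (le_of_lt (hmono hi hj hj0))
  · rw [if_neg h0, List.getElem?_eq_getElem (by omega), pvMaxBelow_eq_some_iff]
    refine ⟨List.getElem_mem _, hmono (by omega) hi (by omega), ?_⟩
    intro y hy hylt
    obtain ⟨j, hj, rfl⟩ := List.mem_iff_getElem.mp hy
    by_cases hji : j < i
    · rcases Nat.lt_or_ge j (i - 1) with hlt | hge
      · exact le_of_lt (hmono hj (by omega) hlt)
      · have hji' : j = i - 1 := by omega
        subst hji'; exact le_refl _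
    · exfalso
      rcases Nat.eq_or_lt_of_le (Nat.le_of_not_lt hji) with heq | hlt
      · subst heq; exact lt_irrefl _ hylt
      · have := hmono hi hj hlt; omega

lemma pvMinAbove_getElem {l : List Int} (hs : l.Pairwise (· < ·)) {i : Nat} (hi : i < l.length) :
    pvMinAbove l (l[i]) = l[i + 1]? := by
  have hmono : ∀ {a b : Nat} (_ : a < l.length) (hb : b < l.length), a < b → l[a]'(by omega) < l[b] :=
    fun ha hb hab => List.pairwise_iff_getElem.mp hs _ _ ha hb hab
  by_cases hend : i + 1 < l.length
  · rw [List.getElem?_eq_getElem hend, pvMinAbove_eq_some_iff]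
    refine ⟨List.getElem_mem _, hmono hi hend (by omega), ?_⟩
    intro y hy hylt
    obtain ⟨j, hj, rfl⟩ := List.mem_iff_getElem.mp hy
    by_cases hji : i + 1 ≤ j
    · rcases Nat.eq_or_lt_of_le hji with heq | hlt
      · subst heq; exact le_refl _
      · exact le_of_lt (hmono hend hj hlt)
    · exfalso
      have hj' : j ≤ i := by omega
      rcases Nat.eq_or_lt_of_le hj' with heq | hlt
      · subst heq; exact lt_irrefl _ hylt
      · have := hmono hj hi hlt; omega
  · rw [List.getElem?_eq_none (by omega), pvMinAbove_eq_none_iff]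
    intro y hy
    obtain ⟨j, hj, rfl⟩ := List.mem_iff_getElem.mp hy
    have hj' : j ≤ i := by omega
    rcases Nat.eq_or_lt_of_le hj' with heq | hlt
    · subst heq; exact lt_irrefl _
    · exact not_lt.mpr (le_of_lt (hmono hj hi hlt))

-- ---- walk lemmas ----

lemma pvWalkU_spec {l dT : List Int} {prevH : Int → Option Int}
    (hs : l.Pairwise (· < ·)) (hp : ∀ x, prevH x = pvPrevOf l dT x) :
    ∀ (m i : Nat) (hi : i < l.length),
      pvWalkU prevH m (some (l[i])) = some (l[i - m]'(by omega)) := by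
  intro m
  induction m with
  | zero => intro i hi; simp [pvWalkU]
  | succ m ih =>
    intro i hi
    have hpc : prevH (l[i]) = if i = 0 then none else l[i - 1]? := by
      rw [hp]; unfold pvPrevOf; rw [if_pos (List.getElem_mem hi)]
      exact pvMaxBelow_getElem hs hi
    by_cases h0 : i = 0
    · subst h0
      rw [if_pos rfl] at hpc
      simp only [pvWalkU, hpc]
      rw [ih 0 hi]
      exact congrArg some (pvGetCongr (by omega) (by omega) (by omega))
    · rw [if_neg h0, List.getElem?_eq_getElem (by omega)] at hpc
      simp only [pvWalkU, hpc]
      rw [ih (i - 1) (by omega)]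
      exact congrArg some (pvGetCongr (by omega) (by omega) (by omega))

lemma pvWalkD_spec {l dT : List Int} {nextH : Int → Option Int}
    (hs : l.Pairwise (· < ·)) (hn : ∀ x, nextH x = pvNextOf l dT x) :
    ∀ (m i : Nat) (hi : i < l.length),
      pvWalkD nextH m (some (l[i])) = some (l[min (l.length - 1) (i + m)]'(by omega)) := by
  intro m
  induction m with
  | zero =>
    intro i hi
    simp only [pvWalkD]
    exact congrArg some (pvGetCongr (by omega) (by omega) (by omega))
  | succ m ih =>
    intro i hi
    have hpc : nextH (l[i]) = l[i + 1]? := by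
      rw [hn]; unfold pvNextOf; rw [if_pos (List.getElem_mem hi)]
      exact pvMinAbove_getElem hs hi
    by_cases hend : i + 1 < l.length
    · rw [List.getElem?_eq_getElem hend] at hpc
      simp only [pvWalkD, hpc]
      rw [ih (i + 1) hend]
      exact congrArg some (pvGetCongr (by omega) (by omega) (by omega))
    · rw [List.getElem?_eq_none (by omega)] at hpc
      simp only [pvWalkD, hpc]
      rw [ih i hi]
      exact congrArg some (pvGetCongr (by omega) (by omega) (by omega))

-- ---- sorted filter facts ----

lemma pvFilter_sorted_append {l : List Int} (hs : l.Pairwise (· < ·)) (v : Int) :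
    l.filter (pvLtv v) ++ l.filter (fun y => !(pvLtv v y)) = l := by
  induction l with
  | nil => rfl
  | cons a t ih =>
    rw [List.pairwise_cons] at hs
    by_cases hav : a < v
    · have h1 : pvLtv v a = true := by simp [pvLtv, hav]
      simp only [List.filter_cons, h1, Bool.not_true]
      simp only [if_true, Bool.false_eq_true, if_false, List.cons_append]
      rw [ih hs.2]
    · have h1 : pvLtv v a = false := by simp [pvLtv, hav]
      have htail1 : t.filter (pvLtv v) = [] := by
        rw [List.filter_eq_nil_iff]; intro b hb
        have := hs.1 b hb; simp [pvLtv]; omega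
      have htail2 : t.filter (fun y => !(pvLtv v y)) = t := by
        rw [List.filter_eq_self]; intro b hb
        have := hs.1 b hb; simp [pvLtv]; omega
      simp [h1, htail1, htail2]

lemma pvMem_filter_lt {l : List Int} {v y : Int} (h : y ∈ l.filter (pvLtv v)) : y ∈ l ∧ y < v := by
  rw [List.mem_filter] at h
  exact ⟨h.1, by simpa [pvLtv] using h.2⟩

lemma pvMem_filter_ge {l : List Int} {v y : Int} (hvl : v ∉ l)
    (h : y ∈ l.filter (fun y => !(pvLtv v y))) : y ∈ l ∧ v < y := by
  rw [List.mem_filter] at h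
  have h1 : ¬ y < v := by simpa [pvLtv] using h.2
  have hne : y ≠ v := by rintro rfl; exact hvl h.1
  exact ⟨h.1, by omega⟩

lemma pvInsortSplit_pairwise {l : List Int} {v : Int} (hs : l.Pairwise (· < ·)) (hvl : v ∉ l) :
    (l.filter (pvLtv v) ++ v :: l.filter (fun y => !(pvLtv v y))).Pairwise (· < ·) := by
  rw [List.pairwise_append]
  refine ⟨hs.filter _, ?_, ?_⟩
  · rw [List.pairwise_cons]
    exact ⟨fun b hb => (pvMem_filter_ge hvl hb).2, hs.filter _⟩
  · intro a ha b hb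
    have h1 := pvMem_filter_lt ha
    rcases List.mem_cons.mp hb with rfl | hb
    · exact h1.2
    · exact lt_trans h1.2 (pvMem_filter_ge hvl hb).2

-- ---- parsing ----

lemma pvCmdOK_parse {c : String} (hok : pvCmdOK c = true)
    (hUD : PySem.Str.pyGet? c 0 = some 'U' ∨ PySem.Str.pyGet? c 0 = some 'D') :
    ∃ x : Int, pvSecondInt? c = some x ∧ 0 ≤ x := by
  unfold pvCmdOK at hok
  rw [Bool.and_eq_true] at hok
  have h2 := hok.2
  rw [if_pos hUD] at h2
  have hget : PySem.List.pyGet? (PySem.Str.split₀ c) 1 = (PySem.Str.split₀ c)[(1 : Nat)]? := by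
    rw [PySem.List.pyGet?_of_nonneg _ (by norm_num)]
    norm_num
  unfold pvSecondInt?
  cases e : (PySem.Str.split₀ c)[(1 : Nat)]? with
  | none =>
    exfalso
    have he : (PySem.Str.split₀ c).getD 1 "" = "" := by
      rw [List.getD_eq_getElem?_getD, e]; rfl
    rw [he] at h2
    have hemp : PySem.Int.ofStr? "" = none := by decide
    rw [hemp] at h2
    simp at h2
  | some t =>
    rw [hget, e]
    have he : (PySem.Str.split₀ c).getD 1 "" = t := by
      rw [List.getD_eq_getElem?_getD, e]; rfl
    rw [he] at h2
    cases e2 : PySem.Int.ofStr? t with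
    | none => rw [e2] at h2; simp at h2
    | some x =>
      rw [e2] at h2
      simp only [decide_eq_true_eq] at h2
      exact ⟨x, by dsimp only; exact e2, h2⟩

-- ---- the four step lemmas ----

lemma pvStepU_inv {n : Int} {sa : PvStA} {sb : PvStB} (h : PvInv n sa sb) {x : Int} (hx : 0 ≤ x) :
    PvInv n { sa with cur := pvWalkU sa.prev x.toNat sa.cur } { sb with pos := max 0 (sb.pos - x) } := by
  obtain ⟨hs, hne, hp0, hpl, hlen, hcur, hde, hnodup, hdisj, hwf, hhp, hhn⟩ := h
  have hi : sb.pos.toNat < sb.alive.length := by omega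
  have hcurv : sa.cur = some (sb.alive[sb.pos.toNat]) := by
    rw [hcur]; exact List.getElem?_eq_getElem hi
  have hlp : 0 < sb.alive.length := List.length_pos_of_ne_nil hne
  refine ⟨hs, hne, by show (0:Int) ≤ max 0 (sb.pos - x); omega,
    by show max 0 (sb.pos - x) < (sb.alive.length : Int); omega,
    hlen, ?_, hde, hnodup, hdisj, hwf, hhp, hhn⟩
  show pvWalkU sa.prev x.toNat sa.cur = sb.alive[(max 0 (sb.pos - x)).toNat]?
  rw [hcurv, pvWalkU_spec hs hhp x.toNat sb.pos.toNat hi,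
    List.getElem?_eq_getElem (show (max 0 (sb.pos - x)).toNat < sb.alive.length by omega)]
  exact congrArg some (pvGetCongr (by omega) (by omega) (by omega))

lemma pvStepD_inv {n : Int} {sa : PvStA} {sb : PvStB} (h : PvInv n sa sb) {x : Int} (hx : 0 ≤ x) :
    PvInv n { sa with cur := pvWalkD sa.next x.toNat sa.cur }
            { sb with pos := min ((sb.alive.length : Int) - 1) (sb.pos + x) } := by
  obtain ⟨hs, hne, hp0, hpl, hlen, hcur, hde, hnodup, hdisj, hwf, hhp, hhn⟩ := h
  have hi : sb.pos.toNat < sb.alive.length := by omega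
  have hcurv : sa.cur = some (sb.alive[sb.pos.toNat]) := by
    rw [hcur]; exact List.getElem?_eq_getElem hi
  have hlp : 0 < sb.alive.length := List.length_pos_of_ne_nil hne
  refine ⟨hs, hne, by show (0:Int) ≤ min ((sb.alive.length : Int) - 1) (sb.pos + x); omega,
    by show min ((sb.alive.length : Int) - 1) (sb.pos + x) < (sb.alive.length : Int); omega,
    hlen, ?_, hde, hnodup, hdisj, hwf, hhp, hhn⟩
  show pvWalkD sa.next x.toNat sa.cur
      = sb.alive[(min ((sb.alive.length : Int) - 1) (sb.pos + x)).toNat]?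
  rw [hcurv, pvWalkD_spec hs hhn x.toNat sb.pos.toNat hi,
    List.getElem?_eq_getElem
      (show (min ((sb.alive.length : Int) - 1) (sb.pos + x)).toNat < sb.alive.length by omega)]
  exact congrArg some (pvGetCongr (by omega) (by omega) (by omega))

lemma pvStepC_inv {n : Int} {sa : PvStA} {sb : PvStB} (h : PvInv n sa sb)
    (hbound : (sb.dead.length : Int) + 1 < n) :
    ∃ v alive',
      sa.cur = some v ∧
      PySem.List.pop? sb.alive sb.pos = some (v, alive') ∧
      PvInv n
        { prev := (match sa.next v with
                   | some q => fun j => if j = q then sa.prev v else sa.prev j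
                   | none => sa.prev),
          next := (match sa.prev v with
                   | some q => fun j => if j = q then sa.next v else sa.next j
                   | none => sa.next),
          cur := (match sa.next v with | none => sa.prev v | some _ => sa.next v),
          dead := sa.dead ++ [v] }
        { alive := alive',
          dead := sb.dead ++ [(v, sb.pos)],
          pos := if sb.pos = (alive'.length : Int) then sb.pos - 1 else sb.pos } := by
  obtain ⟨hs, hne, hp0, hpl, hlen, hcur, hde, hnodup, hdisj, hwf, hhp, hhn⟩ := h
  have hposInt : ((sb.pos.toNat : Int)) = sb.pos := Int.toNat_of_nonneg hp0
  set i := sb.pos.toNat with hidef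
  have hi : i < sb.alive.length := by omega
  set l := sb.alive with hldef
  set v := l[i] with hvdef
  set A := l.take i with hAdef
  set Bd := l.drop (i + 1) with hBdef
  have hsplit : A ++ v :: Bd = l := by
    rw [hAdef, hBdef, hvdef, List.getElem_cons_drop hi, List.take_append_drop]
  have hlenA : A.length = i := by
    rw [hAdef]; rw [List.length_take]; omega
  have hpw : (A ++ v :: Bd).Pairwise (· < ·) := by rw [hsplit]; exact hs
  obtain ⟨hAv, hvB, hpwA, hpwB, hcrossAB, hpw'⟩ := pvSplit_facts hpw
  have hlenAB : (A ++ Bd).length + 1 = l.length := by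
    have := congrArg List.length hsplit
    simp only [List.length_append, List.length_cons] at this
    simp only [List.length_append]
    omega
  have hlge2 : 2 ≤ l.length := by omega
  have hlenABn : A.length + Bd.length + 1 = l.length := by simpa using hlenAB
  have hpop : PySem.List.pop? l sb.pos = some (v, A ++ Bd) := by
    rw [← hposInt, PySem.List.pop?_natCast l i hi, List.eraseIdx_eq_take_drop_succ]
  have hcurv : sa.cur = some v := by rw [hcur]; exact List.getElem?_eq_getElem hi
  have hvmem : v ∈ l := List.getElem_mem hi
  have hdT : ∀ u ∈ (sb.dead.map Prod.fst).reverse, u ∉ A ++ v :: Bd := by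
    intro u hu
    rw [hsplit]
    exact hdisj u (List.mem_reverse.mp hu)
  have hprv : sa.prev v = pvMaxBelow (A ++ v :: Bd) v := by
    rw [hhp v]; unfold pvPrevOf; rw [if_pos hvmem, hsplit]
  have hnxv : sa.next v = pvMinAbove (A ++ v :: Bd) v := by
    rw [hhn v]; unfold pvNextOf; rw [if_pos hvmem, hsplit]
  have hprv' : sa.prev v = if i = 0 then none else l[i - 1]? := by
    rw [hhp v]; unfold pvPrevOf; rw [if_pos hvmem]
    exact pvMaxBelow_getElem hs hi
  have hnxv' : sa.next v = l[i + 1]? := by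
    rw [hhn v]; unfold pvNextOf; rw [if_pos hvmem]
    exact pvMinAbove_getElem hs hi
  have hvnotdead : v ∉ sb.dead.map Prod.fst := fun hm => hdisj v hm hvmem
  have hmemAB : ∀ u, u ∈ A ++ Bd → u ∈ l := by
    intro u hu
    rcases List.mem_append.mp hu with h | h
    · rw [hAdef] at h; exact List.mem_of_mem_take h
    · rw [hBdef] at h; exact List.mem_of_mem_drop h
  refine ⟨v, A ++ Bd, hcurv, hpop, ?_⟩
  have hfacts := pvFilter_split hAv hvB
  refine { sorted := hpw', ne := ?_, pos0 := ?_, posLt := ?_, len := ?_, cur := ?_,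
           deadEq := ?_, nodup := ?_, disj := ?_, wf := ?_, hp := ?_, hn := ?_ }
  · intro h0
    have h0' : A ++ Bd = [] := h0
    rw [h0'] at hlenAB
    simp at hlenAB
    omega
  · show 0 ≤ if sb.pos = ((A ++ Bd).length : Int) then sb.pos - 1 else sb.pos
    simp only [List.length_append]
    split_ifs with hpe <;> omega
  · show (if sb.pos = ((A ++ Bd).length : Int) then sb.pos - 1 else sb.pos) < ((A ++ Bd).length : Int)
    simp only [List.length_append]
    split_ifs with hpe <;> omega
  · show ((A ++ Bd).length : Int) = n - ((sb.dead ++ [(v, sb.pos)]).length : Int)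
    simp only [List.length_append, List.length_cons, List.length_nil]
    push_cast
    omega
  · -- cur
    show (match sa.next v with | none => sa.prev v | some _ => sa.next v)
        = (A ++ Bd)[(if sb.pos = ((A ++ Bd).length : Int) then sb.pos - 1 else sb.pos).toNat]?
    by_cases hend : i + 1 = l.length
    · have hBnil : Bd = [] := by rw [hBdef]; apply List.drop_eq_nil_of_le; omega
      have hnone : sa.next v = none := by rw [hnxv']; exact List.getElem?_eq_none (by omega)
      rw [hnone]
      have hi0 : i ≠ 0 := by omega
      rw [hprv', if_neg hi0]
      have hpe : sb.pos = ((A ++ Bd).length : Int) := by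
        rw [hBnil]; simp only [List.append_nil]; rw [hlenA]; omega
      rw [if_pos hpe]
      have htn : (sb.pos - 1).toNat = i - 1 := by omega
      rw [htn, hBnil, List.append_nil]
      have hAi : A[i-1]? = l[i-1]? := by
        conv_rhs => rw [← hsplit]
        rw [List.getElem?_append_left (by omega)]
      rw [hAi]
    · have hi1 : i + 1 < l.length := by omega
      have hsome : sa.next v = some (l[i + 1]) := by
        rw [hnxv']; exact List.getElem?_eq_getElem hi1
      rw [hsome]
      have hpe : ¬ (sb.pos = ((A ++ Bd).length : Int)) := by
        simp only [List.length_append]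
        omega
      rw [if_neg hpe]
      show some (l[i+1]) = (A ++ Bd)[sb.pos.toNat]?
      rw [← hidef]
      rw [List.getElem?_append_right (by omega), hlenA]
      have : i - i = 0 := by omega
      rw [this, hBdef, List.getElem?_drop]
      rw [List.getElem?_eq_getElem (by omega)]
  · -- deadEq
    show sa.dead ++ [v] = (sb.dead ++ [(v, sb.pos)]).map Prod.fst
    rw [hde]; simp
  · -- nodup
    show ((sb.dead ++ [(v, sb.pos)]).map Prod.fst).Nodup
    simp only [List.map_append, List.map_cons, List.map_nil]
    rw [List.nodup_append]
    refine ⟨hnodup, List.nodup_singleton _, ?_⟩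
    intro a ha b hb
    rw [List.mem_singleton] at hb
    subst hb
    intro heq
    exact hvnotdead (heq ▸ ha)
  · -- disj
    intro u hu
    simp only [List.map_append, List.map_cons, List.map_nil, List.mem_append,
      List.mem_singleton] at hu
    show u ∉ A ++ Bd
    rcases hu with hu | rfl
    · intro hmem
      exact hdisj u hu (hmemAB u hmem)
    · exact pvNotMem_split hAv hvB
  · -- wf
    show pvWfD (A ++ Bd) ((sb.dead ++ [(v, sb.pos)]).reverse)
    rw [List.reverse_append]
    simp only [List.reverse_cons, List.reverse_nil, List.nil_append, List.singleton_append]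
    show v ∉ (A ++ Bd) ∧ sb.pos = (((A ++ Bd).filter (pvLtv v)).length : Int)
        ∧ pvWfD (pvInsort v (A ++ Bd)) sb.dead.reverse
    refine ⟨pvNotMem_split hAv hvB, ?_, ?_⟩
    · rw [hfacts.2.1, hlenA]; omega
    · have hins : pvInsort v (A ++ Bd) = A ++ v :: Bd := by
        unfold pvInsort
        rw [hfacts.2.1, hfacts.2.2.2]
      rw [hins, hsplit]
      exact hwf
  · -- hp
    intro x
    have hdTnew : (((sb.dead ++ [(v, sb.pos)]).map Prod.fst).reverse)
        = v :: (sb.dead.map Prod.fst).reverse := by simp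
    show (match sa.next v with
          | some q => fun j => if j = q then sa.prev v else sa.prev j
          | none => sa.prev) x
        = pvPrevOf (A ++ Bd) (((sb.dead ++ [(v, sb.pos)]).map Prod.fst).reverse) x
    rw [hdTnew]
    have hgoal := pvPrevOf_delete hpw hdT x
    cases hnx : sa.next v with
    | none =>
      dsimp only
      rw [hnxv] at hnx
      rw [hnx] at hgoal
      dsimp only at hgoal
      rw [hsplit] at hgoal
      rw [hhp x]
      exact hgoal
    | some q =>
      dsimp only
      rw [hnxv] at hnx
      rw [hnx] at hgoal
      dsimp only at hgoal
      by_cases hxq : x = q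
      · rw [if_pos hxq]
        rw [if_pos hxq] at hgoal
        rw [hprv]
        exact hgoal
      · rw [if_neg hxq]
        rw [if_neg hxq] at hgoal
        rw [hsplit] at hgoal
        rw [hhp x]
        exact hgoal
  · -- hn
    intro x
    have hdTnew : (((sb.dead ++ [(v, sb.pos)]).map Prod.fst).reverse)
        = v :: (sb.dead.map Prod.fst).reverse := by simp
    show (match sa.prev v with
          | some q => fun j => if j = q then sa.next v else sa.next j
          | none => sa.next) x
        = pvNextOf (A ++ Bd) (((sb.dead ++ [(v, sb.pos)]).map Prod.fst).reverse) x
    rw [hdTnew]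
    have hgoal := pvNextOf_delete hpw hdT x
    cases hpr : sa.prev v with
    | none =>
      dsimp only
      rw [hprv] at hpr
      rw [hpr] at hgoal
      dsimp only at hgoal
      rw [hsplit] at hgoal
      rw [hhn x]
      exact hgoal
    | some q =>
      dsimp only
      rw [hprv] at hpr
      rw [hpr] at hgoal
      dsimp only at hgoal
      by_cases hxq : x = q
      · rw [if_pos hxq]
        rw [if_pos hxq] at hgoal
        rw [hnxv]
        exact hgoal
      · rw [if_neg hxq]
        rw [if_neg hxq] at hgoal
        rw [hsplit] at hgoal
        rw [hhn x]
        exact hgoal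

lemma pvStepZ_inv {n : Int} {sa : PvStA} {sb : PvStB} (h : PvInv n sa sb)
    (hdne : sb.dead ≠ []) :
    ∃ v p dead0, sb.dead = dead0 ++ [(v, p)] ∧
      sa.dead.getLast? = some v ∧ sb.dead.getLast? = some (v, p) ∧
      PvInv n
        { prev := (match sa.next v with
                   | some q => fun j => if j = q then some v else sa.prev j
                   | none => sa.prev),
          next := (match sa.prev v with
                   | some q => fun j => if j = q then some v else sa.next j
                   | none => sa.next),
          cur := sa.cur,
          dead := sa.dead.dropLast }
        { alive := PySem.List.insert sb.alive p v,
          dead := sb.dead.dropLast,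
          pos := if p ≤ sb.pos then sb.pos + 1 else sb.pos } := by
  obtain ⟨hs, hne, hp0, hpl, hlen, hcur, hde, hnodup, hdisj, hwf, hhp, hhn⟩ := h
  rcases List.eq_nil_or_concat sb.dead with hnil | ⟨dead0, vp, hdd⟩
  · exact absurd hnil hdne
  rw [List.concat_eq_append] at hdd
  obtain ⟨v, p⟩ := vp
  have hrev : sb.dead.reverse = (v, p) :: dead0.reverse := by rw [hdd]; simp
  rw [hrev] at hwf
  obtain ⟨hvnal, hpEq, hwf'⟩ := hwf
  set f1 := sb.alive.filter (pvLtv v) with hf1def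
  set f2 := sb.alive.filter (fun y => !(pvLtv v y)) with hf2def
  have happ : f1 ++ f2 = sb.alive := pvFilter_sorted_append hs v
  have hAv : ∀ a ∈ f1, a < v := fun a ha => (pvMem_filter_lt ha).2
  have hvB : ∀ b ∈ f2, v < b := fun b hb => (pvMem_filter_ge hvnal hb).2
  have hpw : (f1 ++ v :: f2).Pairwise (· < ·) := pvInsortSplit_pairwise hs hvnal
  obtain ⟨_, _, _, _, _, hpwAB⟩ := pvSplit_facts hpw
  have hf1le : f1.length ≤ sb.alive.length := by
    have := congrArg List.length happ
    simp only [List.length_append] at this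
    omega
  have hins : PySem.List.insert sb.alive p v = f1 ++ v :: f2 := by
    rw [hpEq, PySem.List.insert_natCast _ _ _ hf1le]
    conv_lhs => rw [← happ]
    rw [List.take_left, List.drop_left]
  have hlenAB : f1.length + f2.length = sb.alive.length := by
    have := congrArg List.length happ
    simp only [List.length_append] at this
    omega
  have hvnotdead0 : v ∉ dead0.map Prod.fst := by
    have hnd := hnodup
    rw [hdd] at hnd
    simp only [List.map_append, List.map_cons, List.map_nil] at hnd
    rw [List.nodup_append] at hnd
    intro hm
    exact hnd.2.2 v hm v (by simp) rfl
  have hdT0 : ∀ u ∈ (dead0.map Prod.fst).reverse, u ∉ f1 ++ v :: f2 := by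
    intro u hu hmem
    have hud : u ∈ dead0.map Prod.fst := List.mem_reverse.mp hu
    have humem : u ∈ sb.dead.map Prod.fst := by
      rw [hdd]
      simp only [List.map_append]
      exact List.mem_append_left _ hud
    have hunal : u ∉ sb.alive := hdisj u humem
    have hunv : u ≠ v := by rintro rfl; exact hvnotdead0 hud
    rcases List.mem_append.mp hmem with h1 | h1
    · exact hunal ((pvMem_filter_lt h1).1)
    · rcases List.mem_cons.mp h1 with rfl | h1
      · exact hunv rfl
      · exact hunal ((pvMem_filter_ge hvnal h1).1)
  have hdTold : (sb.dead.map Prod.fst).reverse = v :: (dead0.map Prod.fst).reverse := by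
    rw [hdd]; simp
  have hprv : sa.prev v = pvMaxBelow (f1 ++ f2) v := by
    rw [hhp v]; unfold pvPrevOf
    rw [if_neg hvnal, hdTold]
    have hvis : pvVisAux sb.alive (v :: (List.map Prod.fst dead0).reverse) v = some sb.alive := by
      simp [pvVisAux]
    rw [hvis]
    show pvMaxBelow sb.alive v = pvMaxBelow (f1 ++ f2) v
    rw [happ]
  have hnxv : sa.next v = pvMinAbove (f1 ++ f2) v := by
    rw [hhn v]; unfold pvNextOf
    rw [if_neg hvnal, hdTold]
    have hvis : pvVisAux sb.alive (v :: (List.map Prod.fst dead0).reverse) v = some sb.alive := by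
      simp [pvVisAux]
    rw [hvis]
    show pvMinAbove sb.alive v = pvMinAbove (f1 ++ f2) v
    rw [happ]
  have hp0' : 0 ≤ p := by rw [hpEq]; positivity
  have hpleLen : p ≤ (sb.alive.length : Int) := by rw [hpEq]; exact_mod_cast hf1le
  refine ⟨v, p, dead0, hdd, ?_, ?_, ?_⟩
  · rw [hde, hdd]; simp
  · rw [hdd]; exact List.getLast?_concat
  refine { sorted := ?_, ne := ?_, pos0 := ?_, posLt := ?_, len := ?_, cur := ?_,
           deadEq := ?_, nodup := ?_, disj := ?_, wf := ?_, hp := ?_, hn := ?_ }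
  · show (PySem.List.insert sb.alive p v).Pairwise (· < ·)
    rw [hins]; exact hpw
  · show PySem.List.insert sb.alive p v ≠ []
    rw [hins]; simp
  · show 0 ≤ if p ≤ sb.pos then sb.pos + 1 else sb.pos
    split_ifs <;> omega
  · show (if p ≤ sb.pos then sb.pos + 1 else sb.pos) < ((PySem.List.insert sb.alive p v).length : Int)
    rw [hins]
    have hL : (f1 ++ v :: f2).length = sb.alive.length + 1 := by
      simp only [List.length_append, List.length_cons]; omega
    rw [hL]
    split_ifs <;> push_cast <;> omega
  · show ((PySem.List.insert sb.alive p v).length : Int) = n - (sb.dead.dropLast.length : Int)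
    rw [hins, hdd]
    have hL : (f1 ++ v :: f2).length = sb.alive.length + 1 := by
      simp only [List.length_append, List.length_cons]; omega
    rw [hL, List.dropLast_concat]
    have : (sb.dead.length : Int) = (dead0.length : Int) + 1 := by
      rw [hdd]; push_cast [List.length_append, List.length_cons, List.length_nil]; ring
    push_cast
    omega
  · -- cur
    show sa.cur = (PySem.List.insert sb.alive p v)[(if p ≤ sb.pos then sb.pos + 1 else sb.pos).toNat]?
    rw [hins]
    by_cases hple : p ≤ sb.pos
    · rw [if_pos hple]
      have ht1 : (sb.pos + 1).toNat = sb.pos.toNat + 1 := by omega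
      have hf1p : f1.length ≤ sb.pos.toNat := by omega
      calc sa.cur = sb.alive[sb.pos.toNat]? := hcur
        _ = (f1 ++ f2)[sb.pos.toNat]? := by rw [happ]
        _ = f2[sb.pos.toNat - f1.length]? := List.getElem?_append_right hf1p
        _ = (v :: f2)[(sb.pos.toNat - f1.length) + 1]? := by rw [List.getElem?_cons_succ]
        _ = (f1 ++ v :: f2)[(sb.pos + 1).toNat]? := by
              rw [List.getElem?_append_right (show f1.length ≤ (sb.pos + 1).toNat by omega)]
              congr 1
              omega
    · rw [if_neg hple]
      have hlt : sb.pos.toNat < f1.length := by omega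
      calc sa.cur = sb.alive[sb.pos.toNat]? := hcur
        _ = (f1 ++ f2)[sb.pos.toNat]? := by rw [happ]
        _ = f1[sb.pos.toNat]? := List.getElem?_append_left hlt
        _ = (f1 ++ v :: f2)[sb.pos.toNat]? := (List.getElem?_append_left hlt).symm
  · -- deadEq
    show sa.dead.dropLast = sb.dead.dropLast.map Prod.fst
    rw [hde, hdd]
    simp
  · -- nodup
    show (sb.dead.dropLast.map Prod.fst).Nodup
    rw [hdd, List.dropLast_concat]
    have hnd := hnodup
    rw [hdd] at hnd
    simp only [List.map_append, List.map_cons, List.map_nil] at hnd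
    rw [List.nodup_append] at hnd
    exact hnd.1
  · -- disj
    intro u hu
    rw [hdd, List.dropLast_concat] at hu
    show u ∉ PySem.List.insert sb.alive p v
    rw [hins]
    exact hdT0 u (List.mem_reverse.mpr hu)
  · -- wf
    show pvWfD (PySem.List.insert sb.alive p v) (sb.dead.dropLast.reverse)
    rw [hins, hdd, List.dropLast_concat]
    exact hwf'
  · -- hp
    intro x
    have hdTnew : ((sb.dead.dropLast.map Prod.fst).reverse) = (dead0.map Prod.fst).reverse := by
      rw [hdd, List.dropLast_concat]
    show (match sa.next v with
          | some q => fun j => if j = q then some v else sa.prev j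
          | none => sa.prev) x
        = pvPrevOf (PySem.List.insert sb.alive p v) ((sb.dead.dropLast.map Prod.fst).reverse) x
    rw [hdTnew, hins]
    have hgoal := pvPrevOf_restore (A := f1) (Bd := f2) (dT := (dead0.map Prod.fst).reverse)
      (v := v) hpw hdT0 x
    cases hnx : sa.next v with
    | none =>
      dsimp only
      rw [hnxv] at hnx
      rw [hnx] at hgoal
      dsimp only at hgoal
      rw [hhp x, hdTold, ← happ]
      exact hgoal
    | some q =>
      dsimp only
      rw [hnxv] at hnx
      rw [hnx] at hgoal
      dsimp only at hgoal
      by_cases hxq : x = q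
      · rw [if_pos hxq]
        rw [if_pos hxq] at hgoal
        exact hgoal
      · rw [if_neg hxq]
        rw [if_neg hxq] at hgoal
        rw [hhp x, hdTold, ← happ]
        exact hgoal
  · -- hn
    intro x
    have hdTnew : ((sb.dead.dropLast.map Prod.fst).reverse) = (dead0.map Prod.fst).reverse := by
      rw [hdd, List.dropLast_concat]
    show (match sa.prev v with
          | some q => fun j => if j = q then some v else sa.next j
          | none => sa.next) x
        = pvNextOf (PySem.List.insert sb.alive p v) ((sb.dead.dropLast.map Prod.fst).reverse) x
    rw [hdTnew, hins]
    have hgoal := pvNextOf_restore (A := f1) (Bd := f2) (dT := (dead0.map Prod.fst).reverse)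
      (v := v) hpw hdT0 x
    cases hpr : sa.prev v with
    | none =>
      dsimp only
      rw [hprv] at hpr
      rw [hpr] at hgoal
      dsimp only at hgoal
      rw [hhn x, hdTold, ← happ]
      exact hgoal
    | some q =>
      dsimp only
      rw [hprv] at hpr
      rw [hpr] at hgoal
      dsimp only at hgoal
      by_cases hxq : x = q
      · rw [if_pos hxq]
        rw [if_pos hxq] at hgoal
        exact hgoal
      · rw [if_neg hxq]
        rw [if_neg hxq] at hgoal
        rw [hhn x, hdTold, ← happ]
        exact hgoal

-- ---- initialization ----

lemma pvHeapFold (g : Int → Option Int) :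
    ∀ (N : Nat) (a b : Int), (b - a).toNat = N → ∀ (f0 : Int → Option Int) (x : Int),
      ((PySem.List.pyRange a b).foldl (fun h i => fun j => if j = i then g i else h j) f0) x
        = if a ≤ x ∧ x < b then g x else f0 x := by
  intro N
  induction N with
  | zero =>
    intro a b hN f0 x
    rw [PySem.List.pyRange_one_eq_nil (by omega)]
    simp only [List.foldl_nil]
    rw [if_neg (by omega)]
  | succ m ih =>
    intro a b hN f0 x
    rw [PySem.List.pyRange_one_cons (by omega)]
    simp only [List.foldl_cons]
    rw [ih (a + 1) b (by omega)]
    by_cases hx : a ≤ x ∧ x < b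
    · rw [if_pos hx]
      by_cases hxa : x = a
      · rw [if_neg (by omega), if_pos hxa, hxa]
      · rw [if_pos (by omega)]
    · have hxa : x ≠ a := by omega
      rw [if_neg hx, if_neg (by omega), if_neg hxa]

lemma pvInitPrev_spec (n : Int) (x : Int) :
    pvInitPrev n x = if 1 ≤ x ∧ x < n then some (x - 1) else none :=
  pvHeapFold (fun i => some (i - 1)) (n - 1).toNat 1 n rfl _ x

lemma pvInitNext_spec (n : Int) (x : Int) :
    pvInitNext n x = if 0 ≤ x ∧ x < n - 1 then some (x + 1) else none :=
  pvHeapFold (fun i => some (i + 1)) (n - 1 - 0).toNat 0 (n - 1) rfl _ x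

lemma pvInit_inv {n k : Int} (hn : 1 ≤ n) (hk0 : -n ≤ k) (hkn : k < n) :
    PvInv n
      { prev := pvInitPrev n, next := pvInitNext n,
        cur := PySem.List.pyGet? (PySem.List.pyRange 0 n) k, dead := [] }
      { alive := PySem.List.pyRange 0 n, dead := [],
        pos := (PySem.List.pyGet? (PySem.List.pyRange 0 n) k).getD 0 } := by
  have hlenN : (PySem.List.pyRange 0 n).length = n.toNat := by
    rw [PySem.List.pyRange_zero]; simp
  have hlen : ((PySem.List.pyRange 0 n).length : Int) = n := by rw [hlenN]; omega
  have hidx : ∀ j : Nat, j < n.toNat → (PySem.List.pyRange 0 n)[j]? = some (j : Int) := by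
    intro j hj
    rw [PySem.List.pyRange_zero, List.getElem?_map, List.getElem?_range hj]
    rfl
  obtain ⟨m, hget, hm0, hmn⟩ :
      ∃ m : Int, PySem.List.pyGet? (PySem.List.pyRange 0 n) k = some m ∧ 0 ≤ m ∧ m < n := by
    by_cases hk : 0 ≤ k
    · refine ⟨k, ?_, hk, hkn⟩
      rw [PySem.List.pyGet?_of_nonneg _ hk, hidx k.toNat (by omega)]
      congr 1
      omega
    · refine ⟨n + k, ?_, by omega, by omega⟩
      rw [PySem.List.pyGet?_neg _ (by omega) (by rw [hlenN]; omega)]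
      rw [hlenN, hidx (n.toNat - (-k).toNat) (by omega)]
      congr 1
      omega
  have hpos : (PySem.List.pyGet? (PySem.List.pyRange 0 n) k).getD 0 = m := by rw [hget]; rfl
  have hmem : ∀ x : Int, x ∈ PySem.List.pyRange 0 n ↔ 0 ≤ x ∧ x < n := by
    intro x; exact PySem.List.mem_pyRange_one
  have hsorted : (PySem.List.pyRange 0 n).Pairwise (· < ·) := by
    rw [PySem.List.pyRange_zero]
    exact List.pairwise_map.mpr (List.pairwise_lt_range.imp (by intro a b h; exact_mod_cast h))
  refine { sorted := hsorted, ne := ?_,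
           pos0 := by show 0 ≤ (PySem.List.pyGet? (PySem.List.pyRange 0 n) k).getD 0; rw [hpos]; omega,
           posLt := by
             show (PySem.List.pyGet? (PySem.List.pyRange 0 n) k).getD 0
                 < ((PySem.List.pyRange 0 n).length : Int)
             rw [hpos]; omega,
           len := by simpa using hlen,
           cur := by
             show PySem.List.pyGet? (PySem.List.pyRange 0 n) k
                 = (PySem.List.pyRange 0 n)[((PySem.List.pyGet? (PySem.List.pyRange 0 n) k).getD 0).toNat]?
             rw [hget]
             show some m = (PySem.List.pyRange 0 n)[m.toNat]?
             rw [hidx m.toNat (by omega)]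
             congr 1
             omega,
           deadEq := rfl, nodup := by simp, disj := by simp, wf := trivial,
           hp := ?_, hn := ?_ }
  · intro h0
    have h0' : PySem.List.pyRange 0 n = [] := h0
    rw [h0'] at hlen
    simp at hlen
    omega
  · intro x
    show pvInitPrev n x
        = pvPrevOf (PySem.List.pyRange 0 n) ((List.map Prod.fst ([] : List (Int × Int))).reverse) x
    rw [pvInitPrev_spec]
    unfold pvPrevOf
    by_cases hx : x ∈ PySem.List.pyRange 0 n
    · rw [if_pos hx]
      have hxb := (hmem x).mp hx
      by_cases hx1 : 1 ≤ x
      · rw [if_pos ⟨hx1, hxb.2⟩]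
        symm
        rw [pvMaxBelow_eq_some_iff]
        refine ⟨(hmem _).mpr ⟨by omega, by omega⟩, by omega, ?_⟩
        intro y hy _
        have := (hmem y).mp hy
        omega
      · rw [if_neg (by omega)]
        symm
        rw [pvMaxBelow_eq_none_iff]
        intro y hy
        have := (hmem y).mp hy
        omega
    · have hxb : ¬ (0 ≤ x ∧ x < n) := fun hh => hx ((hmem x).mpr hh)
      rw [if_neg hx, if_neg (by omega)]
      simp [pvVisAux]
  · intro x
    show pvInitNext n x
        = pvNextOf (PySem.List.pyRange 0 n) ((List.map Prod.fst ([] : List (Int × Int))).reverse) x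
    rw [pvInitNext_spec]
    unfold pvNextOf
    by_cases hx : x ∈ PySem.List.pyRange 0 n
    · rw [if_pos hx]
      have hxb := (hmem x).mp hx
      by_cases hx1 : x < n - 1
      · rw [if_pos ⟨hxb.1, hx1⟩]
        symm
        rw [pvMinAbove_eq_some_iff]
        refine ⟨(hmem _).mpr ⟨by omega, by omega⟩, by omega, ?_⟩
        intro y hy _
        have := (hmem y).mp hy
        omega
      · rw [if_neg (by omega)]
        symm
        rw [pvMinAbove_eq_none_iff]
        intro y hy
        have := (hmem y).mp hy
        omega
    · have hxb : ¬ (0 ≤ x ∧ x < n) := fun hh => hx ((hmem x).mpr hh)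
      rw [if_neg hx, if_neg (by omega)]
      simp [pvVisAux]

-- ---- main loop ----

lemma pvLoop {n : Int} : ∀ (cs : List String) (sa : PvStA) (sb : PvStB),
    PvInv n sa sb → cs.all pvCmdOK = true → pvCzOK n (sb.dead.length : Int) cs = true →
    PvInv n (cs.foldl pvStepA sa) (cs.foldl pvStepB sb) := by
  intro cs
  induction cs with
  | nil => intro sa sb h _ _; simpa using h
  | cons c cs ih =>
    intro sa sb h hall hcz
    rw [List.all_cons, Bool.and_eq_true] at hall
    obtain ⟨hok, hall⟩ := hall
    simp only [List.foldl_cons]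
    by_cases hU : PySem.Str.pyGet? c 0 = some 'U'
    · obtain ⟨x, hxp, hx0⟩ := pvCmdOK_parse hok (Or.inl hU)
      have hA : pvStepA sa c = { sa with cur := pvWalkU sa.prev x.toNat sa.cur } := by
        simp only [pvStepA, if_pos hU, hxp]
      have hB : pvStepB sb c = { sb with pos := max 0 (sb.pos - x) } := by
        simp only [pvStepB, if_pos hU, hxp]
      rw [hA, hB]
      refine ih _ _ (pvStepU_inv h hx0) hall ?_
      have hC : ¬ (PySem.Str.pyGet? c 0 = some 'C') := by rw [hU]; simp
      have hZ : ¬ (PySem.Str.pyGet? c 0 = some 'Z') := by rw [hU]; simp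
      simp only [pvCzOK, if_neg hC, if_neg hZ] at hcz
      exact hcz
    · by_cases hD : PySem.Str.pyGet? c 0 = some 'D'
      · obtain ⟨x, hxp, hx0⟩ := pvCmdOK_parse hok (Or.inr hD)
        have hA : pvStepA sa c = { sa with cur := pvWalkD sa.next x.toNat sa.cur } := by
          simp only [pvStepA, if_neg hU, if_pos hD, hxp]
        have hB : pvStepB sb c
            = { sb with pos := min ((sb.alive.length : Int) - 1) (sb.pos + x) } := by
          simp only [pvStepB, if_neg hU, if_pos hD, hxp]
        rw [hA, hB]
        refine ih _ _ (pvStepD_inv h hx0) hall ?_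
        have hC : ¬ (PySem.Str.pyGet? c 0 = some 'C') := by rw [hD]; simp
        have hZ : ¬ (PySem.Str.pyGet? c 0 = some 'Z') := by rw [hD]; simp
        simp only [pvCzOK, if_neg hC, if_neg hZ] at hcz
        exact hcz
      · by_cases hCc : PySem.Str.pyGet? c 0 = some 'C'
        · simp only [pvCzOK, if_pos hCc, Bool.and_eq_true, decide_eq_true_eq] at hcz
          obtain ⟨hbound, hcztail⟩ := hcz
          obtain ⟨v, alive', hcurv, hpop, hinv'⟩ := pvStepC_inv h hbound
          have hA : pvStepA sa c =
              { prev := (match sa.next v with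
                         | some q => fun j => if j = q then sa.prev v else sa.prev j
                         | none => sa.prev),
                next := (match sa.prev v with
                         | some q => fun j => if j = q then sa.next v else sa.next j
                         | none => sa.next),
                cur := (match sa.next v with | none => sa.prev v | some _ => sa.next v),
                dead := sa.dead ++ [v] } := by
            simp only [pvStepA, if_neg hU, if_neg hD, if_pos hCc, hcurv]
          have hB : pvStepB sb c =
              { alive := alive',
                dead := sb.dead ++ [(v, sb.pos)],
                pos := if sb.pos = (alive'.length : Int) then sb.pos - 1 else sb.pos } := by
            simp only [pvStepB, if_neg hU, if_neg hD, if_pos hCc, hpop]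
          rw [hA, hB]
          refine ih _ _ hinv' hall ?_
          show pvCzOK n (((sb.dead ++ [(v, sb.pos)]).length : Nat) : Int) cs = true
          simp only [List.length_append, List.length_cons, List.length_nil]
          push_cast
          exact hcztail
        · by_cases hZ : PySem.Str.pyGet? c 0 = some 'Z'
          · simp only [pvCzOK, if_neg hCc, if_pos hZ, Bool.and_eq_true, decide_eq_true_eq] at hcz
            obtain ⟨hdpos, hcztail⟩ := hcz
            have hdne : sb.dead ≠ [] := by
              intro h0
              rw [h0] at hdpos
              simp at hdpos
            obtain ⟨v, p, dead0, hdd, hlastA, hlastB, hinv'⟩ := pvStepZ_inv h hdne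
            have hA : pvStepA sa c =
                { prev := (match sa.next v with
                           | some q => fun j => if j = q then some v else sa.prev j
                           | none => sa.prev),
                  next := (match sa.prev v with
                           | some q => fun j => if j = q then some v else sa.next j
                           | none => sa.next),
                  cur := sa.cur,
                  dead := sa.dead.dropLast } := by
              simp only [pvStepA, if_neg hU, if_neg hD, if_neg hCc, if_pos hZ, hlastA]
            have hB : pvStepB sb c =
                { alive := PySem.List.insert sb.alive p v,
                  dead := sb.dead.dropLast,
                  pos := if p ≤ sb.pos then sb.pos + 1 else sb.pos } := by
              simp only [pvStepB, if_neg hU, if_neg hD, if_neg hCc, if_pos hZ, hlastB]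
            rw [hA, hB]
            refine ih _ _ hinv' hall ?_
            show pvCzOK n ((sb.dead.dropLast.length : Nat) : Int) cs = true
            have heq : ((sb.dead.dropLast.length : Nat) : Int) = (sb.dead.length : Int) - 1 := by
              rw [hdd, List.dropLast_concat]
              push_cast [List.length_append, List.length_cons, List.length_nil]
              ring
            rw [heq]
            exact hcztail
          · have hA : pvStepA sa c = sa := by
              simp only [pvStepA, if_neg hU, if_neg hD, if_neg hCc, if_neg hZ]
            have hB : pvStepB sb c = sb := by
              simp only [pvStepB, if_neg hU, if_neg hD, if_neg hCc, if_neg hZ]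
            rw [hA, hB]
            refine ih _ _ h hall ?_
            simp only [pvCzOK, if_neg hCc, if_neg hZ] at hcz
            exact hcz

-- ===== VERDICT (by name: the statement is the Claim_ definition above) =====
theorem solution_spec : Claim_equal_solution := by
  unfold Claim_equal_solution
  intro n k cmd _hdom hpre
  obtain ⟨hn, hk0, hkn, hall, hcz⟩ := hpre
  show solution n k cmd = solution_alt n k cmd
  unfold solution solution_alt
  have h0 := pvInit_inv hn hk0 hkn
  have hfin := pvLoop cmd _ _ h0 hall (by simpa using hcz)
  have hdead := hfin.deadEq
  dsimp only
  rw [hdead, List.foldl_map]
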